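-- pv_equiv track=rewrite | github.com/pennyenterline/Infographic | infographic.py | count_punctuated
-- ===== SOURCE A (Python) =====
-- def count_punctuated(dictionary):
--     '''
--     counts the amount of punctuated and non punctuated letters
--     in the dictionary of words
--     returns the amount of punctuated/nonpunctuated
--     '''
--     punctuated = 0
--     non_punctuated = 0
--     # Loops through each word in words_dict
--     for key in dictionary:
--         if key[-1] == '.':
--             punctuated += 1
--         elif key[-1] == ',':
--             punctuated += 1
--         elif key[-1] == '?':
--             punctuated += 1
--         elif key[-1] == '!':
--             punctuated += 1
--         else:
--             non_punctuated += 1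
--     return punctuated, non_punctuated
-- ===== SOURCE B (Python) =====
-- def count_punctuated(dictionary):
--     # Stage 1: extract the last character of every key (raises IndexError on an
--     # empty key, just like indexing key[-1] in the original).
--     lasts = [key[-1] for key in dictionary]
--     # Stage 2: four independent count scans over the extracted characters.
--     punctuated = lasts.count('.') + lasts.count(',') + lasts.count('?') + lasts.count('!')
--     return punctuated, len(lasts) - punctuated
-- ===== Notes on version B (the rewrite author's own statement) =====
-- stated objective: alternative
-- what changed: B works in staged passes: it first materialises the list of last characters, then obtains the punctuated count as the sum of four list.count scans over that list and derives the non-punctuated count by subtraction from its length, instead of A's single pass updating two counters through a five-way elif chain.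
import Mathlib
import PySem

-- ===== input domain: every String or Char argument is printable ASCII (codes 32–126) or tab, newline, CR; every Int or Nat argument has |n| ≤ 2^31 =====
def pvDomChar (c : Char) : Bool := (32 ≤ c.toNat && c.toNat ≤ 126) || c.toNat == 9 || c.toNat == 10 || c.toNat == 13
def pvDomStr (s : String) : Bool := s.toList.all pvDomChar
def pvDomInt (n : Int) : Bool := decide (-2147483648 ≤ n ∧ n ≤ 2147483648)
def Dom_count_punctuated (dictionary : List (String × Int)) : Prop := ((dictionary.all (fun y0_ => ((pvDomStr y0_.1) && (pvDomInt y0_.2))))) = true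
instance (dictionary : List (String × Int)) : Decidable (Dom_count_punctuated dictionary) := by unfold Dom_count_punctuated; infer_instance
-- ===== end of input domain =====

-- B computes the result in staged passes (extract last characters, then four count
-- scans plus a length subtraction) instead of A's single two-counter elif loop
-- (objective: alternative; return-value equivalence).

-- ===== PORT A =====
-- the for-loop over the dict's keys, carrying A's two counters; on an empty key
-- key[-1] raises IndexError (pyGet? = none) — unreachable under Pre_, state returned as-is
def cpLoopA : List (String × Int) → Int → Int → Int × Int
  | [], punctuated, non_punctuated => (punctuated, non_punctuated)
  | kv :: rest, punctuated, non_punctuated =>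
    match PySem.Str.pyGet? kv.1 (-1) with
    | none => (punctuated, non_punctuated)
    | some c =>
      if c = '.' then cpLoopA rest (punctuated + 1) non_punctuated
      else if c = ',' then cpLoopA rest (punctuated + 1) non_punctuated
      else if c = '?' then cpLoopA rest (punctuated + 1) non_punctuated
      else if c = '!' then cpLoopA rest (punctuated + 1) non_punctuated
      else cpLoopA rest punctuated (non_punctuated + 1)

def count_punctuated (dictionary : List (String × Int)) : Int × Int :=
  cpLoopA dictionary 0 0

-- ===== PORT B =====
-- stage 1: the comprehension [key[-1] for key in dictionary]; an empty key raises
-- IndexError in Python (pyGet? = none) — unreachable under Pre_, comprehension cut short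
def cpLasts : List (String × Int) → List Char
  | [] => []
  | kv :: rest =>
    match PySem.Str.pyGet? kv.1 (-1) with
    | none => []
    | some c => c :: cpLasts rest

def count_punctuated_alt (dictionary : List (String × Int)) : Int × Int :=
  let lasts := cpLasts dictionary
  let punctuated : Int :=
    (lasts.count '.' : Int) + (lasts.count ',' : Int) + (lasts.count '?' : Int) + (lasts.count '!' : Int)
  (punctuated, (lasts.length : Int) - punctuated)

-- ===== PRECONDITION & SPEC =====
-- Pre_ excludes inputs containing an empty-string key, on which both A and B raise IndexError.
def Pre_count_punctuated (dictionary : List (String × Int)) : Prop :=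
  ∀ kv ∈ dictionary, kv.1 ≠ ""
instance (dictionary : List (String × Int)) : Decidable (Pre_count_punctuated dictionary) := by
  unfold Pre_count_punctuated; infer_instance

def pvWitness_count_punctuated : (List (String × Int)) := [("hi.", 2), ("yo", 1), ("eh?", 7)]

def Spec_count_punctuated (dictionary : List (String × Int)) (out : Int × Int) : Prop := out = count_punctuated_alt dictionary
instance (dictionary : List (String × Int)) (out : Int × Int) : Decidable (Spec_count_punctuated dictionary out) := by unfold Spec_count_punctuated; infer_instance

-- ===== CLAIM =====
def Claim_equal_count_punctuated : Prop := ∀ (dictionary : List (String × Int)), Dom_count_punctuated dictionary → Pre_count_punctuated dictionary → Spec_count_punctuated dictionary (count_punctuated dictionary)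

-- ===== LEMMAS AND PROOFS =====

-- punctuated count of a list of last characters, as B computes it
def cpP (l : List Char) : Int :=
  (l.count '.' : Int) + (l.count ',' : Int) + (l.count '?' : Int) + (l.count '!' : Int)

lemma cpLoopA_eq (d : List (String × Int)) :
    ∀ p np : Int, (∀ kv ∈ d, kv.1 ≠ "") →
      cpLoopA d p np = (p + cpP (cpLasts d), np + (((cpLasts d).length : Int) - cpP (cpLasts d))) := by
  induction d with
  | nil => intro p np _; simp [cpLoopA, cpLasts, cpP]
  | cons kv rest ih =>
    intro p np h
    have hne : kv.1 ≠ "" := h kv (List.mem_cons_self ..)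
    have hnil : kv.1.toList ≠ [] := by
      intro hnil; exact hne (String.toList_inj.mp (by rw [hnil]; rfl))
    obtain ⟨c, hc'⟩ : ∃ c, PySem.List.pyGet? kv.1.toList (-1) = some c := by
      rw [PySem.List.pyGet?_neg_one]
      exact Option.isSome_iff_exists.mp (List.getLast?_isSome.mpr hnil)
    have hc : PySem.Str.pyGet? kv.1 (-1) = some c := by simpa using hc'
    have hrest : ∀ x ∈ rest, x.1 ≠ "" := fun x hx => h x (List.mem_cons_of_mem _ hx)
    simp only [cpLoopA, cpLasts, hc]
    split_ifs with h1 h2 h3 h4 <;>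
      rw [ih _ _ hrest] <;>
      refine Prod.ext ?_ ?_ <;>
      simp [cpP, List.count_cons, h1] <;>
      simp_all <;>
      omega

-- ===== VERDICT =====
theorem count_punctuated_spec : Claim_equal_count_punctuated := by
  intro d _ hpre
  unfold Spec_count_punctuated count_punctuated count_punctuated_alt
  rw [cpLoopA_eq d 0 0 hpre]
  simp [cpP]
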